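-- pv_equiv track=rewrite | github.com/xocelyk/test-benford | streamlit-benford-app.py | get_first_digit
-- ===== SOURCE A (Python) =====
-- def get_first_digit(num, idx=0):
--     num = str(num)
--     if idx >= len(str(num)):
--         return None
--     if num[idx] in [str(i) for i in range(1,10)]:
--         return num[idx]
--     else:
--         return get_first_digit(num, idx+1)
-- ===== SOURCE B (Python) =====
-- def get_first_digit(num, idx=0):
--     s = str(num)
--     for i in range(idx, len(s)):
--         if s[i] in '123456789':
--             return s[i]
--     return None
-- ===== Notes on version B (the rewrite author's own statement) =====
-- stated objective: idiomatic
-- what changed: Replaces A's tail recursion with a single iterative scan over range(idx, len(s)) that returns the first character found in '123456789', with an implicit None after the loop.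
import Mathlib
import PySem

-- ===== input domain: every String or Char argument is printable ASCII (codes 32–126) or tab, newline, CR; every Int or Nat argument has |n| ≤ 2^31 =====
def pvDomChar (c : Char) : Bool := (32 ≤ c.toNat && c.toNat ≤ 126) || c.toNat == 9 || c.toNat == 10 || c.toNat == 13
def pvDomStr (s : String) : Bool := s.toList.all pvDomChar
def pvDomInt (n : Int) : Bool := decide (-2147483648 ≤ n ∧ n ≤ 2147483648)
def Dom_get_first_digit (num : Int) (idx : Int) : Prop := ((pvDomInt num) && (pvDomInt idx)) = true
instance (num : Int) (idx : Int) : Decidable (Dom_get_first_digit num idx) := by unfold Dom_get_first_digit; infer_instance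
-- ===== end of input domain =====

-- B replaces A's tail recursion by an iterative scan over range(idx, len(s)) (idiomatic; return value only).

-- ===== PORT A =====
-- A's recursion: after the first call num is already a string, so the recursion runs over
-- the fixed list of characters s with the growing index idx.
def getFirstDigitGo (s : List Char) (idx : Int) : Option String :=
  if idx ≥ (s.length : Int) then none
  else
    match PySem.List.pyGet? s idx with
    | none => none   -- IndexError in Python; excluded by Pre_
    | some c =>
      if String.ofList [c] ∈ (PySem.List.pyRange 1 10 1).map PySem.Int.toStr then some (String.ofList [c])
      else getFirstDigitGo s (idx + 1)
termination_by ((s.length : Int) - idx).toNat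
decreasing_by omega

def get_first_digit (num : Int) (idx : Int) : Option String :=
  getFirstDigitGo (PySem.Int.toChars num) idx

-- ===== PORT B =====
def get_first_digit_alt (num : Int) (idx : Int) : Option String :=
  let s := PySem.Int.toChars num
  (PySem.List.pyRange idx (s.length : Int) 1).findSome? (fun i =>
    match PySem.List.pyGet? s i with
    | some c => if c ∈ "123456789".toList then some (String.ofList [c]) else none
    | none => none)

-- ===== PRECONDITION & SPEC =====
-- Pre_ excludes exactly the inputs where Python A raises IndexError: idx below -len(str(num)).
def Pre_get_first_digit (num : Int) (idx : Int) : Prop :=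
  -((PySem.Int.toChars num).length : Int) ≤ idx

instance (num : Int) (idx : Int) : Decidable (Pre_get_first_digit num idx) := by
  unfold Pre_get_first_digit; infer_instance

def pvWitness_get_first_digit : Int × Int := (123, 0)

def Spec_get_first_digit (num : Int) (idx : Int) (out : Option String) : Prop :=
  out = get_first_digit_alt num idx
instance (num : Int) (idx : Int) (out : Option String) : Decidable (Spec_get_first_digit num idx out) := by
  unfold Spec_get_first_digit; infer_instance

-- ===== CLAIM (what is proved, stated in full; the proofs are below) =====
def Claim_equal_get_first_digit : Prop := ∀ (num : Int) (idx : Int), Dom_get_first_digit num idx → Pre_get_first_digit num idx → Spec_get_first_digit num idx (get_first_digit num idx)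

-- ===== LEMMAS AND PROOFS =====

lemma digitsA_eq : (PySem.List.pyRange 1 10 1).map PySem.Int.toStr
    = ["1","2","3","4","5","6","7","8","9"] := by decide

lemma strOfList_singleton_inj (c d : Char) :
    (String.ofList [c] = String.ofList [d]) ↔ c = d := by
  rw [String.ofList_inj]; simp

lemma digit_mem (c : Char) :
    (String.ofList [c] ∈ (["1","2","3","4","5","6","7","8","9"] : List String))
      ↔ c ∈ "123456789".toList := by
  rw [show (["1","2","3","4","5","6","7","8","9"] : List String)
        = ['1','2','3','4','5','6','7','8','9'].map (fun d => String.ofList [d]) from rfl,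
      List.mem_map,
      show "123456789".toList = ['1','2','3','4','5','6','7','8','9'] from by decide]
  constructor
  · rintro ⟨d, hd, he⟩
    have hdc : d = c := (strOfList_singleton_inj d c).mp he
    rwa [← hdc]
  · intro hc
    exact ⟨c, hc, rfl⟩

lemma go_eq_findSome (s : List Char) (idx : Int) (h : -(s.length : Int) ≤ idx) :
    getFirstDigitGo s idx
      = (PySem.List.pyRange idx (s.length : Int) 1).findSome? (fun i =>
          match PySem.List.pyGet? s i with
          | some c => if c ∈ "123456789".toList then some (String.ofList [c]) else none
          | none => none) := by
  by_cases hge : idx ≥ (s.length : Int)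
  · rw [getFirstDigitGo, if_pos hge, PySem.List.pyRange_one_eq_nil hge]
    rfl
  · rw [not_le] at hge
    rw [PySem.List.pyRange_one_cons hge, List.findSome?_cons]
    have hin : PySem.Raise.InRange s.length idx := by
      constructor <;> omega
    obtain ⟨c, hc⟩ : ∃ c, PySem.List.pyGet? s idx = some c := by
      rcases hg : PySem.List.pyGet? s idx with _ | c
      · exact absurd hin ((PySem.List.pyGet?_eq_none_iff _ _).mp hg)
      · exact ⟨c, rfl⟩
    rw [getFirstDigitGo, if_neg (by omega)]
    simp only [hc, digitsA_eq]
    by_cases hd : c ∈ "123456789".toList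
    · rw [if_pos ((digit_mem c).mpr hd), if_pos hd]
    · rw [if_neg (fun hm => hd ((digit_mem c).mp hm)), if_neg hd]
      exact go_eq_findSome s (idx + 1) (by omega)
termination_by ((s.length : Int) - idx).toNat
decreasing_by omega

-- ===== VERDICT (by name: the statement is the Claim_ definition above) =====
theorem get_first_digit_spec : Claim_equal_get_first_digit := by
  intro num idx _ hpre
  unfold Spec_get_first_digit get_first_digit get_first_digit_alt
  exact go_eq_findSome _ idx hpre
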